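-- pv_equiv track=rewrite | github.com/KaithelynJose/HARP_v2 | HARP/gui/functions/fcn_project.py | notesToAsciiTab
-- ===== SOURCE A (Python) =====
-- def notesToAsciiTab(notes):
--
--     string = [
--         ['E4','F4','F#4','G4','G#4','A4','A#4','B4','C5','C#5','D5','D#5','E5','F5','F#5','G5','G#5','A5','A#5','B5'],
--         ['B3','C4','C#4','D4','D#4'],
--         ['G3','G#3','A3','A#3'],
--         ['D3','D#3','E3','F3','F#3'],
--         ['A2','A#2','B2','C3','C#3'],
--         ['E2','F2','F#2','G2','G#2'],
--     ]
--     asciiText = [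
--         'e |-',
--         'B |-',
--         'G |-',
--         'D |-',
--         'A |-',
--         'E |-',
--     ]
--
--     for note in notes:
--         idxFound = False
--         stringIdx = 0
--         for idx in range(0,len(string)):
--             if note in string[idx]:
--                 idxFound = True
--                 stringIdx = idx
--                 break
--
--         if idxFound:
--             fretNum = str(string[stringIdx].index(note))
--             for idx in range(0,len(string)):
--                 if idx == stringIdx:
--                     asciiText[idx] += fretNum + '-'
--                 else:
--                     asciiText[idx] += '-' * (len(fretNum) + 1)
--         else:
--             for idx in range(0,len(string)):
--                 asciiText[idx] += '--'
--
--
--     return asciiText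
-- ===== SOURCE B (Python) =====
-- def notesToAsciiTab(notes):
--     STRINGS = [
--         ['E4','F4','F#4','G4','G#4','A4','A#4','B4','C5','C#5','D5','D#5','E5','F5','F#5','G5','G#5','A5','A#5','B5'],
--         ['B3','C4','C#4','D4','D#4'],
--         ['G3','G#3','A3','A#3'],
--         ['D3','D#3','E3','F3','F#3'],
--         ['A2','A#2','B2','C3','C#3'],
--         ['E2','F2','F#2','G2','G#2'],
--     ]
--     PREFIX = ['e |-', 'B |-', 'G |-', 'D |-', 'A |-', 'E |-']
--
--     # one flat lookup table built once; first occurrence wins, like A's scan order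
--     lookup = {}
--     for si, arr in enumerate(STRINGS):
--         for fret, name in enumerate(arr):
--             lookup.setdefault(name, (si, str(fret)))
--
--     # first pass: compute each note's column offset and record the fret digits to place
--     placed = []   # (stringIdx, column offset, fret digits)
--     pos = 0
--     for n in notes:
--         hit = lookup.get(n)
--         if hit is None:
--             pos += 2
--         else:
--             si, f = hit
--             placed.append((si, pos, f))
--             pos += len(f) + 1
--
--     # second pass: preallocate a 6 x pos dash grid and write fret digits in place
--     grid = [['-'] * pos for _ in range(6)]
--     for si, off, f in placed:
--         grid[si][off:off + len(f)] = list(f)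
--
--     return [p + ''.join(row) for p, row in zip(PREFIX, grid)]
-- ===== Notes on version B (the rewrite author's own statement) =====
-- stated objective: faster
-- what changed: A scans the six string tables per note and grows all six lines by repeated string concatenation; B builds a flat note->(string,fret) dict once, computes each note's column offset in one pass, then preallocates a 6 x width dash matrix and writes the fret digits in place by slice assignment before joining each row once.
import Mathlib
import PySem

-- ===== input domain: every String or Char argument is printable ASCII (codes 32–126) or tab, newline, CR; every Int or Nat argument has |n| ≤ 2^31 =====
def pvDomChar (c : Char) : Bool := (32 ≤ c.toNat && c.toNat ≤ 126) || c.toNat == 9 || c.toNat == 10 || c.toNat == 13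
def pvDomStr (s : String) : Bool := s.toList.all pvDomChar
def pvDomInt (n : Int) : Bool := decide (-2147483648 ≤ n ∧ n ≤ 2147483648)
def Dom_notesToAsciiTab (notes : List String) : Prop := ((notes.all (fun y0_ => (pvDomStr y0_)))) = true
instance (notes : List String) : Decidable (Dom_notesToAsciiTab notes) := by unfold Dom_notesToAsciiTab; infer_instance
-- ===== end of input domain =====

-- B replaces A's per-note table scan and quadratic string concatenation by a note->(string,fret)
-- dict built once, an offset pass, and positional writes into a preallocated dash grid; objective: faster.

-- the constant tables both Pythons write out literally
def pvStrings : List (List String) := [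
  ["E4","F4","F#4","G4","G#4","A4","A#4","B4","C5","C#5","D5","D#5","E5","F5","F#5","G5","G#5","A5","A#5","B5"],
  ["B3","C4","C#4","D4","D#4"],
  ["G3","G#3","A3","A#3"],
  ["D3","D#3","E3","F3","F#3"],
  ["A2","A#2","B2","C3","C#3"],
  ["E2","F2","F#2","G2","G#2"]]
def pvPrefixes : List String := ["e |-", "B |-", "G |-", "D |-", "A |-", "E |-"]

-- ===== PORT A =====
-- A's inner search loop: idxFound/stringIdx with break at the first string list containing note
def pvFindLoop (note : String) : List (List String) → Nat → Bool × Nat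
  | [], _ => (false, 0)
  | l :: rest, i => if l.contains note then (true, i) else pvFindLoop note rest (i + 1)

-- A's found-branch loop over idx in range(len(string)): asciiText[idx] += fretNum+'-' or '-'*(len+1)
def pvStepFound (fret : String) (j : Nat) : List String → Nat → List String
  | [], _ => []
  | s :: rest, i =>
      (if i == j then s ++ fret ++ "-"
       else s ++ String.ofList (List.replicate (fret.toList.length + 1) '-'))  -- '-' * n is replicate
        :: pvStepFound fret j rest (i + 1)

def notesToAsciiTab (notes : List String) : List String :=
  notes.foldl (fun acc note =>
    let r := pvFindLoop note pvStrings 0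
    if r.1 then
      let fret := PySem.Int.toStr (((PySem.List.index? (pvStrings.getD r.2 []) note).getD 0 : Nat) : Int)
      pvStepFound fret r.2 acc 0
    else
      acc.map (fun s => s ++ "--"))
    pvPrefixes

-- ===== PORT B =====
-- for fret, name in enumerate(arr): lookup.setdefault(name, (si, str(fret)))
def pvBuildRow (si : Nat) (d : PySem.Dict String (Nat × String)) (arr : List String) :
    PySem.Dict String (Nat × String) :=
  (PySem.List.enumerate arr 0).foldl (fun d q => d.setdefault q.2 (si, PySem.Int.toStr q.1)) d

-- for si, arr in enumerate(STRINGS): (build one row of the lookup)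
def pvBuild : List (List String) → Nat → PySem.Dict String (Nat × String) → PySem.Dict String (Nat × String)
  | [], _, d => d
  | arr :: rest, si, d => pvBuild rest (si + 1) (pvBuildRow si d arr)

def pvLookup : PySem.Dict String (Nat × String) := pvBuild pvStrings 0 PySem.Dict.empty

-- one step of the offset pass: append a placed record or just advance pos
def pvScanStep (st : List (Nat × Nat × String) × Nat) (n : String) : List (Nat × Nat × String) × Nat :=
  match pvLookup.get? n with
  | none => (st.1, st.2 + 2)
  | some (si, f) => (st.1 ++ [(si, st.2, f)], st.2 + f.toList.length + 1)

-- grid[si][off:off+len(f)] = list(f)  (equal-length slice assignment)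
def pvWrite (off : Nat) (f : String) (row : List Char) : List Char :=
  row.take off ++ f.toList ++ row.drop (off + f.toList.length)

def notesToAsciiTab_alt (notes : List String) : List String :=
  let st := notes.foldl pvScanStep ([], 0)
  let grid0 : List (List Char) := List.replicate 6 (List.replicate st.2 '-')
  let grid := st.1.foldl (fun g w => g.modify w.1 (pvWrite w.2.1 w.2.2)) grid0
  List.zipWith (fun p row => p ++ String.ofList row) pvPrefixes grid

-- ===== PRECONDITION & SPEC =====
def Spec_notesToAsciiTab (notes : List String) (out : List String) : Prop := out = notesToAsciiTab_alt notes
instance (notes : List String) (out : List String) : Decidable (Spec_notesToAsciiTab notes out) := by unfold Spec_notesToAsciiTab; infer_instance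

-- ===== CLAIM (what is proved, stated in full; the proofs are below) =====
def Claim_equal_notesToAsciiTab : Prop := ∀ (notes : List String), Dom_notesToAsciiTab notes → Spec_notesToAsciiTab notes (notesToAsciiTab notes)

-- ===== LEMMAS AND PROOFS =====

-- canonical per-note resolution (first string list containing note, with its fret string)
def pvResolveGo (note : String) : List (List String) → Nat → Option (Nat × String)
  | [], _ => none
  | l :: rest, i =>
      if l.contains note then some (i, PySem.Int.toStr (((PySem.List.index? l note).getD 0 : Nat) : Int))
      else pvResolveGo note rest (i + 1)

def pvResolve (note : String) : Option (Nat × String) := pvResolveGo note pvStrings 0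

-- the tab segment a note contributes to line i (string form and char form)
def pvPiece (i : Nat) (r : Option (Nat × String)) : String :=
  match r with
  | none => "--"
  | some (j, f) => if i == j then f ++ "-" else String.ofList (List.replicate (f.toList.length + 1) '-')

def pvSeg (i : Nat) (r : Option (Nat × String)) : List Char :=
  match r with
  | none => ['-', '-']
  | some (j, f) => if i == j then f.toList ++ ['-'] else List.replicate (f.toList.length + 1) '-'

-- one note's update of all lines in A, written pointwise through pvPiece
def pvUpdate (r : Option (Nat × String)) : List String → Nat → List String
  | [], _ => []
  | s :: rest, i => (s ++ pvPiece i r) :: pvUpdate r rest (i + 1)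

def pvLines : List String → Nat → List (Option (Nat × String)) → List String
  | [], _, _ => []
  | p :: rest, i, recs => recs.foldl (fun s r => s ++ pvPiece i r) p :: pvLines rest (i + 1) recs

-- spec shapes for B's offset pass
def pvWidth : Option (Nat × String) → Nat
  | none => 2
  | some (_, f) => f.toList.length + 1

def pvPlacedFrom : Nat → List (Option (Nat × String)) → List (Nat × Nat × String)
  | _, [] => []
  | p, none :: rs => pvPlacedFrom (p + 2) rs
  | p, some (j, f) :: rs => (j, p, f) :: pvPlacedFrom (p + f.toList.length + 1) rs

def pvTotalW (rs : List (Option (Nat × String))) : Nat := (rs.map pvWidth).sum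

-- ---- A-side: A's fold is pvLines over the resolved notes ----

lemma pvResolveGo_eq (note : String) :
    ∀ (ls : List (List String)) (i : Nat), pvStrings.drop i = ls →
      pvResolveGo note ls i =
        if (pvFindLoop note ls i).1 then
          some ((pvFindLoop note ls i).2,
            PySem.Int.toStr (((PySem.List.index? (pvStrings.getD (pvFindLoop note ls i).2 []) note).getD 0 : Nat) : Int))
        else none := by
  intro ls
  induction ls with
  | nil => intro i _; simp [pvResolveGo, pvFindLoop]
  | cons l rest ih =>
    intro i hdrop
    have hget : pvStrings[i]? = some l := by
      have h0 := congrArg (fun t => t[0]?) hdrop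
      simpa [List.getElem?_drop] using h0
    by_cases hc : note ∈ l
    · simp [pvResolveGo, pvFindLoop, hc, hget]
    · have hrest : pvStrings.drop (i + 1) = rest := by
        rw [← List.tail_drop, hdrop]; rfl
      simp [pvResolveGo, pvFindLoop, hc, ih (i + 1) hrest]

lemma pvStepFound_eq (fret : String) (j : Nat) :
    ∀ (acc : List String) (i : Nat), pvStepFound fret j acc i = pvUpdate (some (j, fret)) acc i := by
  intro acc
  induction acc with
  | nil => intro i; rfl
  | cons s rest ih =>
      intro i
      simp only [pvStepFound, pvUpdate, pvPiece, ih]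
      split_ifs <;> simp [String.append_assoc]

lemma pvMap_eq (acc : List String) : ∀ i : Nat,
    acc.map (fun s => s ++ "--") = pvUpdate none acc i := by
  induction acc with
  | nil => intro i; rfl
  | cons s rest ih => intro i; simp [pvUpdate, pvPiece, ih (i + 1)]

lemma pvStep_eq (note : String) (acc : List String) :
    (let r := pvFindLoop note pvStrings 0
     if r.1 then
       let fret := PySem.Int.toStr (((PySem.List.index? (pvStrings.getD r.2 []) note).getD 0 : Nat) : Int)
       pvStepFound fret r.2 acc 0
     else acc.map (fun s => s ++ "--")) = pvUpdate (pvResolve note) acc 0 := by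
  have h := pvResolveGo_eq note pvStrings 0 rfl
  unfold pvResolve
  by_cases hf : (pvFindLoop note pvStrings 0).1
  · simp only [hf, if_true] at h ⊢
    rw [h, pvStepFound_eq]
  · simp only [hf] at h ⊢
    simp [h, pvMap_eq acc 0]

lemma pvLines_nil : ∀ (acc : List String) (i : Nat), pvLines acc i [] = acc := by
  intro acc
  induction acc with
  | nil => intro i; rfl
  | cons s rest ih => intro i; simp [pvLines, ih]

lemma pvLines_update : ∀ (acc : List String) (i : Nat) (r : Option (Nat × String)) (recs : List (Option (Nat × String))),
    pvLines (pvUpdate r acc i) i recs = pvLines acc i (r :: recs) := by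
  intro acc
  induction acc with
  | nil => intro i r recs; rfl
  | cons s rest ih => intro i r recs; simp [pvUpdate, pvLines, List.foldl_cons, ih]

lemma pvFold_eq : ∀ (notes : List String) (acc : List String),
    notes.foldl (fun acc note =>
      let r := pvFindLoop note pvStrings 0
      if r.1 then
        let fret := PySem.Int.toStr (((PySem.List.index? (pvStrings.getD r.2 []) note).getD 0 : Nat) : Int)
        pvStepFound fret r.2 acc 0
      else acc.map (fun s => s ++ "--")) acc
    = pvLines acc 0 (notes.map pvResolve) := by
  intro notes
  induction notes with
  | nil => intro acc; simp [pvLines_nil]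
  | cons n ns ih =>
    intro acc
    simp only [List.foldl_cons, List.map_cons]
    rw [ih, pvStep_eq, pvLines_update]

-- ---- B-side step 1: the dict lookup is pvResolve ----

lemma pvRowFold (n : String) (si : Nat) :
    ∀ (arr : List String) (s : Int) (d : PySem.Dict String (Nat × String)),
      ((PySem.List.enumerate arr s).foldl (fun d q => d.setdefault q.2 (si, PySem.Int.toStr q.1)) d).get? n
      = (d.get? n).or
          (if n ∈ arr then some (si, PySem.Int.toStr (s + (((PySem.List.index? arr n).getD 0 : Nat) : Int))) else none) := by
  intro arr
  induction arr with
  | nil => intro s d; simp [PySem.List.enumerate]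
  | cons a rest ih =>
    intro s d
    rw [PySem.List.enumerate_cons]
    simp only [List.foldl_cons]
    rw [ih (s + 1) (d.setdefault a (si, PySem.Int.toStr s))]
    by_cases hna : n = a
    · subst hna
      rw [PySem.Dict.get?_setdefault_self]
      simp only [PySem.List.index?, List.idxOf?_cons]
      simp only [List.mem_cons, true_or, if_true, beq_self_eq_true, if_true]
      cases d.get? n <;> simp
    · rw [PySem.Dict.get?_setdefault_of_ne _ _ hna]
      simp only [PySem.List.index?, List.idxOf?_cons]
      have hban : (a == n) = false := by simp [Ne.symm hna]
      simp only [hban, List.mem_cons, hna, false_or]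
      by_cases hm : n ∈ rest
      · simp only [hm, if_true]
        cases hidx : List.idxOf? n rest with
        | none => simp_all [List.idxOf?_eq_none_iff]
        | some k =>
          have harith : s + 1 + (k : Int) = s + ((k + 1 : Nat) : Int) := by push_cast; ring
          simp [harith]
      · simp [hm]

lemma pvBuild_get (n : String) :
    ∀ (ls : List (List String)) (si : Nat) (d : PySem.Dict String (Nat × String)),
      (pvBuild ls si d).get? n = (d.get? n).or (pvResolveGo n ls si) := by
  intro ls
  induction ls with
  | nil => intro si d; simp [pvBuild, pvResolveGo]
  | cons arr rest ih =>
    intro si d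
    simp only [pvBuild, pvResolveGo]
    rw [ih, pvBuildRow, pvRowFold]
    by_cases hm : n ∈ arr
    · simp [hm]
    · simp [hm]

lemma pvLookup_get (n : String) : pvLookup.get? n = pvResolve n := by
  unfold pvLookup pvResolve
  rw [pvBuild_get]
  simp [PySem.Dict.empty, PySem.Dict.get?]

-- ---- B-side step 2: the offset pass computes pvPlacedFrom and pvTotalW ----

lemma pvScan_eq : ∀ (notes : List String) (acc : List (Nat × Nat × String)) (p : Nat),
    notes.foldl pvScanStep (acc, p)
      = (acc ++ pvPlacedFrom p (notes.map pvResolve), p + pvTotalW (notes.map pvResolve)) := by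
  intro notes
  induction notes with
  | nil => intro acc p; simp [pvPlacedFrom, pvTotalW]
  | cons n ns ih =>
    intro acc p
    simp only [List.foldl_cons, List.map_cons]
    rw [show pvScanStep (acc, p) n = (match pvResolve n with
      | none => (acc, p + 2)
      | some (si, f) => (acc ++ [(si, p, f)], p + f.toList.length + 1)) by
        unfold pvScanStep
        rw [pvLookup_get]]
    cases hr : pvResolve n with
    | none =>
      rw [ih]
      simp [pvPlacedFrom, pvTotalW, pvWidth]
      omega
    | some v =>
      obtain ⟨j, f⟩ := v
      rw [ih]
      simp [pvPlacedFrom, pvTotalW, pvWidth]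
      omega

-- ---- B-side step 3: grid rows ----

lemma pvGrid_row : ∀ (ws : List (Nat × Nat × String)) (g : List (List Char)) (i : Nat),
    (ws.foldl (fun g w => g.modify w.1 (pvWrite w.2.1 w.2.2)) g)[i]? =
      (g[i]?).map (fun row => (ws.filter (fun w => w.1 == i)).foldl (fun row w => pvWrite w.2.1 w.2.2 row) row) := by
  intro ws
  induction ws with
  | nil => intro g i; simp
  | cons w rest ih =>
    intro g i
    simp only [List.foldl_cons, List.filter_cons]
    by_cases hw : w.1 = i
    · rw [ih]
      cases hge : g[i]? <;> simp [hw, hge]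

    · rw [ih]
      have hbw : (w.1 == i) = false := by simp [hw]
      simp [hw, hbw]

lemma pvGrid_len : ∀ (ws : List (Nat × Nat × String)) (g : List (List Char)),
    (ws.foldl (fun g w => g.modify w.1 (pvWrite w.2.1 w.2.2)) g).length = g.length := by
  intro ws
  induction ws with
  | nil => intro g; rfl
  | cons w rest ih => intro g; simp [List.foldl_cons, ih]

lemma pvRow_render (i : Nat) : ∀ (rs : List (Option (Nat × String))) (xs : List Char),
    ((pvPlacedFrom xs.length rs).filter (fun w => w.1 == i)).foldl (fun row w => pvWrite w.2.1 w.2.2 row)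
        (xs ++ List.replicate (pvTotalW rs) '-')
      = xs ++ (rs.map (fun r => pvSeg i r)).flatten := by
  intro rs
  induction rs with
  | nil => intro xs; simp [pvPlacedFrom, pvTotalW]
  | cons r rest ih =>
    intro xs
    cases r with
    | none =>
      have hw : pvTotalW (none :: rest) = 2 + pvTotalW rest := by simp [pvTotalW, pvWidth]
      rw [hw]
      simp only [pvPlacedFrom, pvSeg, List.map_cons, List.flatten_cons]
      have hrep : List.replicate (2 + pvTotalW rest) '-' = ['-', '-'] ++ List.replicate (pvTotalW rest) '-' := by
        simp [List.replicate_add]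
      rw [hrep, ← List.append_assoc]
      have := ih (xs ++ ['-', '-'])
      simp only [List.length_append, List.length_cons, List.length_nil] at this
      rw [show xs.length + 2 = xs.length + (1 + 1) by omega] at *
      simpa [pvSeg] using this
    | some v =>
      obtain ⟨j, f⟩ := v
      have hw : pvTotalW (some (j, f) :: rest) = (f.toList.length + 1) + pvTotalW rest := by
        simp [pvTotalW, pvWidth]
      rw [hw]
      simp only [pvPlacedFrom, pvSeg, List.map_cons, List.flatten_cons, List.filter_cons]
      have hrep : List.replicate ((f.toList.length + 1) + pvTotalW rest) '-' =
          List.replicate (f.toList.length + 1) '-' ++ List.replicate (pvTotalW rest) '-' := by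
        simp [List.replicate_add]
      by_cases hj : j = i
      · subst hj
        simp only [beq_self_eq_true, if_true, List.foldl_cons]
        have hwrite : pvWrite xs.length f (xs ++ List.replicate ((f.toList.length + 1) + pvTotalW rest) '-')
            = (xs ++ (f.toList ++ ['-'])) ++ List.replicate (pvTotalW rest) '-' := by
          unfold pvWrite
          rw [List.take_left, List.drop_length_add_append, List.drop_replicate]
          have h1 : (f.toList.length + 1) + pvTotalW rest - f.toList.length = pvTotalW rest + 1 := by omega
          rw [h1, List.replicate_succ]
          simp
        rw [hwrite]
        have := ih (xs ++ (f.toList ++ ['-']))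
        simp only [List.length_append, List.length_cons, List.length_nil] at this
        rw [show xs.length + (f.toList.length + 1) = xs.length + f.toList.length + 1 by omega] at *
        simpa [pvSeg] using this
      · have hbj : (j == i) = false := by simp [hj]
        simp only [hbj, Bool.false_eq_true, if_false]
        rw [hrep, ← List.append_assoc]
        have := ih (xs ++ List.replicate (f.toList.length + 1) '-')
        simp only [List.length_append, List.length_replicate] at this
        rw [show xs.length + (f.toList.length + 1) = xs.length + f.toList.length + 1 by omega] at *
        simpa [pvSeg, Ne.symm hj] using this

-- ---- joining both sides ----

lemma pvPiece_toList (i : Nat) (r : Option (Nat × String)) : (pvPiece i r).toList = pvSeg i r := by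
  cases r with
  | none => simp [pvPiece, pvSeg]
  | some v =>
    obtain ⟨j, f⟩ := v
    simp only [pvPiece, pvSeg]
    by_cases h : i = j <;> simp [h]

lemma pvLine_eq (i : Nat) : ∀ (rs : List (Option (Nat × String))) (p : String),
    rs.foldl (fun s r => s ++ pvPiece i r) p = p ++ String.ofList ((rs.map (fun r => pvSeg i r)).flatten) := by
  intro rs
  induction rs with
  | nil =>
    intro p
    apply String.toList_inj.mp
    simp
  | cons r rest ih =>
    intro p
    simp only [List.foldl_cons, List.map_cons, List.flatten_cons]
    rw [ih]
    apply String.toList_inj.mp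
    simp [pvPiece_toList]

lemma pvList6 {α : Type} (l : List α) (a0 a1 a2 a3 a4 a5 : α) (h : l.length = 6)
    (h0 : l[0]? = some a0) (h1 : l[1]? = some a1) (h2 : l[2]? = some a2)
    (h3 : l[3]? = some a3) (h4 : l[4]? = some a4) (h5 : l[5]? = some a5) :
    l = [a0, a1, a2, a3, a4, a5] := by
  rcases l with _|⟨x0,_|⟨x1,_|⟨x2,_|⟨x3,_|⟨x4,_|⟨x5,_|⟨x6,t⟩⟩⟩⟩⟩⟩⟩ <;> simp_all

-- ===== VERDICT (by name: the statement is the Claim_ definition above) =====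
theorem notesToAsciiTab_spec : Claim_equal_notesToAsciiTab := by
  intro notes _
  show notesToAsciiTab notes = notesToAsciiTab_alt notes
  unfold notesToAsciiTab notesToAsciiTab_alt
  rw [pvFold_eq notes pvPrefixes, pvScan_eq notes [] 0]
  simp only [List.nil_append, Nat.zero_add]
  have hrow : ∀ i : Nat, i < 6 →
      ((pvPlacedFrom 0 (notes.map pvResolve)).foldl (fun g w => g.modify w.1 (pvWrite w.2.1 w.2.2))
        (List.replicate 6 (List.replicate (pvTotalW (notes.map pvResolve)) '-')))[i]? =
      some (((notes.map pvResolve).map (fun r => pvSeg i r)).flatten) := by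
    intro i hi
    rw [pvGrid_row]
    have h0 : (List.replicate 6 (List.replicate (pvTotalW (notes.map pvResolve)) '-'))[i]? =
        some (List.replicate (pvTotalW (notes.map pvResolve)) '-') := by
      interval_cases i <;> rfl
    rw [h0]
    have hr := pvRow_render i (notes.map pvResolve) ([] : List Char)
    simp only [List.length_nil, List.nil_append] at hr
    simp [hr]
  have hlen : ((pvPlacedFrom 0 (notes.map pvResolve)).foldl (fun g w => g.modify w.1 (pvWrite w.2.1 w.2.2))
      (List.replicate 6 (List.replicate (pvTotalW (notes.map pvResolve)) '-'))).length = 6 := by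
    rw [pvGrid_len]; simp
  have hgrid := pvList6 _ _ _ _ _ _ _ hlen (hrow 0 (by omega)) (hrow 1 (by omega)) (hrow 2 (by omega))
    (hrow 3 (by omega)) (hrow 4 (by omega)) (hrow 5 (by omega))
  rw [hgrid]
  simp only [pvPrefixes, pvLines, List.zipWith]
  rw [pvLine_eq 0, pvLine_eq (0 + 1), pvLine_eq (0 + 1 + 1), pvLine_eq (0 + 1 + 1 + 1),
    pvLine_eq (0 + 1 + 1 + 1 + 1), pvLine_eq (0 + 1 + 1 + 1 + 1 + 1)]
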